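-- pv_equiv track=rewrite | github.com/pypi-data/pypi-mirror-384 | packages/virginia-clemm-poe/virginia_clemm_poe-1.0.33-py3-none-any.whl/virginia_clemm_poe/utils/validation.py | validate_model_id
-- ===== SOURCE A (Python) =====
-- def validate_model_id(model_id: str, valid_ids: list[str]) -> tuple[bool, str | None]:
--     """Validate and suggest corrections for model IDs.
--
--     Args:
--         model_id: The model ID to validate
--         valid_ids: List of valid model IDs
--
--     Returns:
--         Tuple of (is_valid, suggested_id)
--     """
--     # Exact match
--     if model_id in valid_ids:
--         return True, None
--
--     # Case-insensitive match
--     lower_id = model_id.lower()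
--     for valid_id in valid_ids:
--         if valid_id.lower() == lower_id:
--             return False, valid_id
--
--     # Fuzzy matching (simple substring search)
--     suggestions = []
--     for valid_id in valid_ids:
--         if lower_id in valid_id.lower() or valid_id.lower() in lower_id:
--             suggestions.append(valid_id)
--
--     if len(suggestions) == 1:
--         return False, suggestions[0]
--     elif len(suggestions) > 1:
--         # Return the shortest match as the best suggestion
--         return False, min(suggestions, key=len)
--
--     return False, None
-- ===== SOURCE B (Python) =====
-- def validate_model_id(model_id: str, valid_ids: list[str]) -> tuple[bool, str | None]:
--     """Single pass over valid_ids maintaining exact flag, first case-insensitive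
--     match and the substring-suggestion list, instead of A's three scans."""
--     lower_id = model_id.lower()
--     exact_found = False
--     first_ci = None
--     suggestions = []
--     for valid_id in valid_ids:
--         vl = valid_id.lower()
--         if valid_id == model_id:
--             exact_found = True
--         if first_ci is None and vl == lower_id:
--             first_ci = valid_id
--         if lower_id in vl or vl in lower_id:
--             suggestions.append(valid_id)
--     if exact_found:
--         return True, None
--     if first_ci is not None:
--         return False, first_ci
--     if len(suggestions) == 1:
--         return False, suggestions[0]
--     if len(suggestions) > 1:
--         return False, min(suggestions, key=len)
--     return False, None
-- ===== Notes on version B (the rewrite author's own statement) =====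
-- stated objective: alternative
-- what changed: Replaces A's three sequential scans (membership test, case-insensitive loop, substring-collection loop) with one loop that maintains an exact-match flag, the first case-insensitive match and the suggestion list simultaneously.
import Mathlib
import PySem

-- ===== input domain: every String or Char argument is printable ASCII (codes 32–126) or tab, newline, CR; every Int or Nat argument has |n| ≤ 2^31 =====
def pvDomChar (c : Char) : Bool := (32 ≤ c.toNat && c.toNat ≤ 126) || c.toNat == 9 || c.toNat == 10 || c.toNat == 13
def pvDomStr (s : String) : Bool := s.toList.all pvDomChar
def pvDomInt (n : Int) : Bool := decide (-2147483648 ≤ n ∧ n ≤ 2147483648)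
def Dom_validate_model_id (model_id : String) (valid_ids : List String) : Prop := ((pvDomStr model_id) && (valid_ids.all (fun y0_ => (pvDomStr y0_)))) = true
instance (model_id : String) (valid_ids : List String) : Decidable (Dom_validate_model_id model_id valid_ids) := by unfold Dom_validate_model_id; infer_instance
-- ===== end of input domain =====

-- B fuses A's three scans (exact membership, first case-insensitive match, substring
-- suggestion collection) into one loop over valid_ids; same results, alternative structure.

-- ===== PORT A =====
-- A's second loop: return the first valid_id whose lower() equals lower_id
def vmidCiLoop (lower_id : String) : List String → Option String
  | [] => none
  | v :: rest => if PySem.Str.lower v == lower_id then some v else vmidCiLoop lower_id rest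

def validate_model_id (model_id : String) (valid_ids : List String) : Bool × Option String :=
  if valid_ids.contains model_id then (true, none)
  else
    let lower_id := PySem.Str.lower model_id
    match vmidCiLoop lower_id valid_ids with
    | some v => (false, some v)
    | none =>
      let suggestions := valid_ids.foldl (fun acc v =>
        if PySem.Str.isIn lower_id (PySem.Str.lower v) || PySem.Str.isIn (PySem.Str.lower v) lower_id
        then acc ++ [v] else acc) []
      if suggestions.length == 1 then (false, PySem.List.pyGet? suggestions 0)
      else if suggestions.length > 1 then (false, PySem.List.min? suggestions (fun s => PySem.Str.len s))
      else (false, none)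

-- ===== PORT B =====
-- one step of B's single loop, updating (exact_found, first_ci, suggestions)
def vmidStep (model_id lower_id : String) (st : Bool × Option String × List String) (v : String) :
    Bool × Option String × List String :=
  let vl := PySem.Str.lower v
  let exact := st.1 || (v == model_id)
  let ci := match st.2.1 with
    | some x => some x
    | none => if vl == lower_id then some v else none
  let sug := if PySem.Str.isIn lower_id vl || PySem.Str.isIn vl lower_id then st.2.2 ++ [v] else st.2.2
  (exact, ci, sug)

def validate_model_id_alt (model_id : String) (valid_ids : List String) : Bool × Option String :=
  let lower_id := PySem.Str.lower model_id
  let st := valid_ids.foldl (vmidStep model_id lower_id) (false, none, [])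
  if st.1 then (true, none)
  else match st.2.1 with
  | some v => (false, some v)
  | none =>
    if st.2.2.length == 1 then (false, PySem.List.pyGet? st.2.2 0)
    else if st.2.2.length > 1 then (false, PySem.List.min? st.2.2 (fun s => PySem.Str.len s))
    else (false, none)

-- ===== PRECONDITION & SPEC =====
def Spec_validate_model_id (model_id : String) (valid_ids : List String) (out : Bool × Option String) : Prop := out = validate_model_id_alt model_id valid_ids
instance (model_id : String) (valid_ids : List String) (out : Bool × Option String) : Decidable (Spec_validate_model_id model_id valid_ids out) := by unfold Spec_validate_model_id; infer_instance

-- ===== CLAIM (what is proved, stated in full; the proofs are below) =====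
def Claim_equal_validate_model_id : Prop := ∀ (model_id : String) (valid_ids : List String), Dom_validate_model_id model_id valid_ids → Spec_validate_model_id model_id valid_ids (validate_model_id model_id valid_ids)

-- ===== LEMMAS AND PROOFS =====

-- B's fold state, characterised: exact flag = membership, ci slot = A's ci loop (first match),
-- suggestion list = A's filtered collection.
lemma vmid_fold_spec (m lid : String) (xs : List String) (b : Bool) (o : Option String) (l : List String) :
    xs.foldl (vmidStep m lid) (b, o, l) =
      (b || xs.any (fun v => v == m),
       (match o with | some x => some x | none => vmidCiLoop lid xs),
       l ++ xs.filter (fun v => PySem.Str.isIn lid (PySem.Str.lower v) || PySem.Str.isIn (PySem.Str.lower v) lid)) := by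
  induction xs generalizing b o l with
  | nil => cases o <;> simp [vmidCiLoop]
  | cons x t ih =>
    simp only [List.foldl_cons, vmidStep, List.any_cons, List.filter_cons, vmidCiLoop]
    rw [ih]
    cases o with
    | some y => simp [Bool.or_assoc]; split_ifs <;> simp
    | none => simp [Bool.or_assoc]; split_ifs <;> simp

lemma vmid_contains (m : String) (xs : List String) :
    xs.contains m = xs.any (fun v => v == m) := by
  induction xs with
  | nil => rfl
  | cons x t ih => rw [List.contains_cons, List.any_cons, ← ih, BEq.comm]

-- ===== VERDICT (by name: the statement is the Claim_ definition above) =====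
theorem validate_model_id_spec : Claim_equal_validate_model_id := by
  intro model_id valid_ids _
  show _ = _
  simp only [validate_model_id, validate_model_id_alt, vmid_fold_spec, ← vmid_contains,
    PySem.List.foldl_append_if_eq_filter, List.nil_append, Bool.false_or]
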